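-- pv_equiv track=rewrite | github.com/amiyilade/go-ir | scripts/process_single_chunk.py | tree_to_intermediate_nodes
-- ===== SOURCE A (Python) =====
-- def tree_to_intermediate_nodes(parent_indices):
--     """Convert tree to set of intermediate nodes (sibling pairs)."""
--     n = len(parent_indices)
--     intermediate_nodes = set()
--
--     children_by_parent = {}
--     for i, parent in enumerate(parent_indices):
--         if parent != -1:
--             if parent not in children_by_parent:
--                 children_by_parent[parent] = []
--             children_by_parent[parent].append(i)
--
--     for parent, children in children_by_parent.items():
--         for i in range(len(children)):
--             for j in range(i + 1, len(children)):
--                 intermediate_nodes.add((children[i], children[j]))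
--                 intermediate_nodes.add((children[j], children[i]))
--
--     return intermediate_nodes
-- ===== SOURCE B (Python) =====
-- def tree_to_intermediate_nodes(parent_indices):
--     """Sibling pairs via ordered dedup of parents + per-parent index scans (no dict of lists)."""
--     seen = []
--     for p in parent_indices:
--         if p != -1 and p not in seen:
--             seen.append(p)
--     pairs = []
--     for p in seen:
--         group = [i for i, q in enumerate(parent_indices) if q == p]
--         while group:
--             a = group.pop(0)
--             for b in group:
--                 pairs.append((a, b))
--                 pairs.append((b, a))
--     return set(pairs)
-- ===== Notes on version B (the rewrite author's own statement) =====
-- stated objective: alternative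
-- what changed: Replaces the dict-of-lists grouping and double-index pair loops by an ordered dedup of parents, a per-parent comprehension recomputing each sibling group, and a head-pop pairing pass that emits both directions per head, collected in a flat list turned into a set once.
import Mathlib
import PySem

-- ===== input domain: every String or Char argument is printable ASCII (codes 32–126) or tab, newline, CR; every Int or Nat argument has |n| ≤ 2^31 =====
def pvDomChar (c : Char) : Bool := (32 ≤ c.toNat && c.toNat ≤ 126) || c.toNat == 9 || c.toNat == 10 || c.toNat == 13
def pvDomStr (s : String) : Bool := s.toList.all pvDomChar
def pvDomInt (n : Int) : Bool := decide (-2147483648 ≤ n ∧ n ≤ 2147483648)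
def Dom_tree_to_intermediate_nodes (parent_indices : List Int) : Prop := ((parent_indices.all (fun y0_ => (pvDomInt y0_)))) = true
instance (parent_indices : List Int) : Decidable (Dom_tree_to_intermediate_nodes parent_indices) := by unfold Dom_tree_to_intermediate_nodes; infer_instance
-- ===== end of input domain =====

-- B replaces A's dict-of-lists grouping + double-index pair loops by an ordered dedup of
-- parents, per-parent index scans and a head-pop pairing pass (alternative decomposition,
-- not claimed faster). Equivalence proved on all inputs (both are total).

-- ===== PORT A =====
def tree_to_intermediate_nodes (parent_indices : List Int) : List (Int × Int) :=
  let children_by_parent : PySem.Dict Int (List Int) :=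
    (PySem.List.enumerate parent_indices 0).foldl
      (fun d ip =>
        if ip.2 ≠ -1 then
          let d1 := if d.contains ip.2 then d else d.insert ip.2 []
          d1.insert ip.2 (d1.getD ip.2 [] ++ [ip.1])
        else d)
      PySem.Dict.empty
  children_by_parent.items.foldl
    (fun s pc =>
      (PySem.List.pyRange 0 (PySem.List.len pc.2) 1).foldl
        (fun s i =>
          (PySem.List.pyRange (i + 1) (PySem.List.len pc.2) 1).foldl
            (fun s j =>
              PySem.Set.add
                (PySem.Set.add s (PySem.List.pyGetD pc.2 i 0, PySem.List.pyGetD pc.2 j 0))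
                (PySem.List.pyGetD pc.2 j 0, PySem.List.pyGetD pc.2 i 0))
            s)
        s)
    PySem.Set.empty

-- ===== PORT B =====
-- 'while group: a = group.pop(0); for b in group: …' as head/tail recursion
def pvSibPairs : List Int → List (Int × Int)
  | [] => []
  | a :: rest => rest.flatMap (fun b => [(a, b), (b, a)]) ++ pvSibPairs rest

def tree_to_intermediate_nodes_alt (parent_indices : List Int) : List (Int × Int) :=
  let seen : List Int :=
    parent_indices.foldl (fun s p => if p ≠ -1 ∧ p ∉ s then s ++ [p] else s) []
  let pairs : List (Int × Int) :=
    seen.foldl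
      (fun acc p =>
        acc ++ pvSibPairs
          ((PySem.List.enumerate parent_indices 0).filterMap
            (fun iq => if iq.2 = p then some iq.1 else none)))
      []
  PySem.Set.ofList pairs

-- ===== PRECONDITION & SPEC =====
def Spec_tree_to_intermediate_nodes (parent_indices : List Int) (out : List (Int × Int)) : Prop := out = tree_to_intermediate_nodes_alt parent_indices
instance (parent_indices : List Int) (out : List (Int × Int)) : Decidable (Spec_tree_to_intermediate_nodes parent_indices out) := by unfold Spec_tree_to_intermediate_nodes; infer_instance

-- ===== CLAIM (what is proved, stated in full; the proofs are below) =====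
def Claim_equal_tree_to_intermediate_nodes : Prop := ∀ (parent_indices : List Int), Dom_tree_to_intermediate_nodes parent_indices → Spec_tree_to_intermediate_nodes parent_indices (tree_to_intermediate_nodes parent_indices)

-- ===== LEMMAS AND PROOFS =====

-- two interleaved adds per element = fold of add over the flatMap of both directions
lemma pv_foldl_add2 (u v : Int → Int × Int) (l : List Int) (s : PySem.Set (Int × Int)) :
    l.foldl (fun s b => PySem.Set.add (PySem.Set.add s (u b)) (v b)) s
      = (l.flatMap (fun b => [u b, v b])).foldl PySem.Set.add s := by
  induction l generalizing s with
  | nil => rfl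
  | cons b t ih => simp [List.foldl_cons, ih]

-- fold over a flatMap is the nested fold
lemma pv_foldl_flatMap {α β γ : Type} (g : α → List β) (h : γ → β → γ) (l : List α) (init : γ) :
    (l.flatMap g).foldl h init = l.foldl (fun acc x => (g x).foldl h acc) init := by
  induction l generalizing init with
  | nil => rfl
  | cons x t ih => simp [List.flatMap_cons, List.foldl_append, ih]

-- A's triangular double loop over a group = fold of add over pvSibPairs of the group
lemma pv_tri_general (f : Int → Int) (n : Int) :
    ∀ (k : Nat) (a : Int) (s : PySem.Set (Int × Int)), (n - a).toNat = k →
      (PySem.List.pyRange a n 1).foldl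
        (fun s i =>
          (PySem.List.pyRange (i + 1) n 1).foldl
            (fun s j => PySem.Set.add (PySem.Set.add s (f i, f j)) (f j, f i)) s) s
      = (pvSibPairs ((PySem.List.pyRange a n 1).map f)).foldl PySem.Set.add s := by
  intro k
  induction k with
  | zero =>
    intro a s hk
    rw [PySem.List.pyRange_one_eq_nil (by omega)]
    rfl
  | succ k ih =>
    intro a s hk
    have ha : a < n := by omega
    rw [PySem.List.pyRange_one_cons ha]
    simp only [List.foldl_cons, List.map_cons, pvSibPairs, List.foldl_append]
    rw [ih (a + 1) _ (by omega)]
    congr 1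
    rw [← pv_foldl_add2 (fun b => (f a, b)) (fun b => (b, f a))]
    rw [List.foldl_map]

lemma pv_tri (c : List Int) (s : PySem.Set (Int × Int)) :
    (PySem.List.pyRange 0 (PySem.List.len c) 1).foldl
      (fun s i =>
        (PySem.List.pyRange (i + 1) (PySem.List.len c) 1).foldl
          (fun s j =>
            PySem.Set.add
              (PySem.Set.add s (PySem.List.pyGetD c i 0, PySem.List.pyGetD c j 0))
              (PySem.List.pyGetD c j 0, PySem.List.pyGetD c i 0)) s) s
    = (pvSibPairs c).foldl PySem.Set.add s := by
  rw [pv_tri_general (fun i => PySem.List.pyGetD c i 0) (PySem.List.len c)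
        (PySem.List.len c - 0).toNat 0 s rfl]
  rw [PySem.List.map_pyGetD_pyRange_zero]

-- A's 'setdefault-then-append' dict step is Dict.modify
lemma pv_step_eq_modify (d : PySem.Dict Int (List Int)) (ip : Int × Int) :
    (if ip.2 ≠ -1 then
        let d1 := if d.contains ip.2 then d else d.insert ip.2 []
        d1.insert ip.2 (d1.getD ip.2 [] ++ [ip.1])
      else d)
    = if ip.2 ≠ -1 then d.modify ip.2 [] (· ++ [ip.1]) else d := by
  by_cases h : ip.2 = -1
  · simp [h]
  · simp only [h, ne_eq, not_false_iff, if_pos]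
    by_cases hc : d.contains ip.2
    · simp [hc, PySem.Dict.modify]
    · simp [hc, PySem.Dict.modify, PySem.Dict.getD_insert_self,
        PySem.Dict.insert_insert_self, PySem.Dict.getD_of_not_contains]

-- snd-projection of a snd-filter of an enumerate is the filter of the base list
lemma pv_map_snd_filter (L : List (Int × Int)) (q : Int → Bool) :
    ((L.filter (fun ip => q ip.2)).map (fun ip => ip.2)) = (L.map (fun ip => ip.2)).filter q := by
  induction L with
  | nil => rfl
  | cons x t ih =>
    by_cases h : q x.2 <;> simp [h, ih]

-- the group A stores under key c equals B's comprehension for c (c ≠ -1)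
lemma pv_grp_eq (L : List (Int × Int)) (c : Int) (hc : c ≠ -1) :
    ((((L.filter (fun ip => ip.2 ≠ -1)).map (fun ip => (ip.2, ip.1))).filter
        (fun p => p.1 == c)).map (fun p => p.2))
    = L.filterMap (fun iq => if iq.2 = c then some iq.1 else none) := by
  simp only [ne_eq]
  induction L with
  | nil => rfl
  | cons x t ih =>
    simp only [List.filter_cons, List.filterMap_cons]
    simp only [decide_not] at ih
    by_cases h2 : x.2 = -1
    · have h1 : ¬(-1 : Int) = c := fun h => hc h.symm
      simp [h2, h1, ih]
    · by_cases hx : x.2 = c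
      · simp [hx, hc, ih]
      · simp [h2, hx, ih]

-- B's seen-accumulation step is Set.add guarded by the -1 test
lemma pv_seen_step (s : List Int) (p : Int) :
    (if p ≠ -1 ∧ p ∉ s then s ++ [p] else s)
    = if p ≠ -1 then PySem.Set.add s p else s := by
  by_cases h1 : p = -1
  · simp [h1]
  · by_cases hm : p ∈ s <;> simp [h1, hm, PySem.Set.add]

theorem tree_to_intermediate_nodes_spec : Claim_equal_tree_to_intermediate_nodes := by
  intro pl _
  unfold Spec_tree_to_intermediate_nodes
  unfold tree_to_intermediate_nodes tree_to_intermediate_nodes_alt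
  simp only [pv_step_eq_modify, pv_seen_step]
  rw [PySem.List.foldl_ite_eq_foldl_filter, PySem.List.foldl_ite_eq_foldl_filter]
  set E := PySem.List.enumerate pl 0 with hE
  set L := (E.filter (fun ip => decide (ip.2 ≠ -1))).map (fun ip => (ip.2, ip.1)) with hL
  have hfoldL : (E.filter (fun ip => decide (ip.2 ≠ -1))).foldl
      (fun d ip => d.modify ip.2 [] (· ++ [ip.1])) PySem.Dict.empty
      = L.foldl (fun d p => d.modify p.1 [] (· ++ [p.2])) PySem.Dict.empty := by
    rw [hL, List.foldl_map]
  rw [hfoldL]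
  set D := L.foldl (fun d p => d.modify p.1 [] (· ++ [p.2])) PySem.Dict.empty with hD
  have hnodup : D.keys.Nodup := by
    rw [hD]
    exact PySem.Dict.nodup_keys_foldl_modify_key L Prod.fst [] (fun d x => (· ++ [x.2]))
      PySem.Dict.empty (by simp)
  have hkeys : D.keys = PySem.Set.ofList (pl.filter (fun p => decide (p ≠ -1))) := by
    rw [hD, PySem.Dict.keys_foldl_modify_key]
    rw [PySem.Dict.keys_empty, PySem.Set.update_nil_left]
    congr 1
    rw [hL, List.map_map]
    have : ((fun p => p.1) ∘ fun ip => (ip.2, ip.1)) = fun (ip : Int × Int) => ip.2 := rfl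
    rw [this, pv_map_snd_filter E (fun z => decide (z ≠ -1)), hE, PySem.List.map_snd_enumerate]
  have hget : ∀ c, D.getD c [] = (L.filter (fun p => p.1 == c)).map (fun p => p.2) := by
    intro c
    rw [hD, PySem.Dict.getD_foldl_modify_append, PySem.Dict.getD_empty]
    simp
  have hitems : D.items = D.keys.map (fun k => (k, D.getD k [])) :=
    PySem.Dict.items_eq_map_keys D hnodup []
  rw [hitems, List.foldl_map]
  have hgrp : ∀ k : Int, k ≠ -1 →
      D.getD k [] = E.filterMap (fun iq => if iq.2 = k then some iq.1 else none) := by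
    intro k hk
    rw [hget k, hL]
    exact pv_grp_eq E k hk
  have hne : ∀ k ∈ D.keys, k ≠ -1 := by
    intro k hkmem
    rw [hkeys] at hkmem
    have := (PySem.Set.mem_ofList _ _).mp hkmem
    simpa using (List.mem_filter.mp this).2
  have hseen : List.foldl PySem.Set.add [] (List.filter (fun x => decide (x ≠ -1)) pl)
      = D.keys := by
    rw [hkeys, PySem.Set.ofList_eq_foldl]
  rw [hseen]
  rw [PySem.List.foldl_append_eq_flatMap, List.nil_append]
  rw [PySem.Set.ofList_eq_foldl, pv_foldl_flatMap]
  apply PySem.List.foldl_congr_mem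
  intro s k hk
  rw [pv_tri (D.getD k []) s, hgrp k (hne k hk)]
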